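-- pv_equiv track=rewrite | github.com/lisaterumi/multiconer-help | AnaliseCorpus/AbreCorpus.py | getSentencesOnly
-- ===== SOURCE A (Python) =====
-- def getSentencesOnly(dados):
--     newDados = []
--     for sent in dados:
--         try:
--             newDados.append(list(list(zip(*sent))[0]))
--         except:
--             pass
--     return newDados
-- ===== SOURCE B (Python) =====
-- def getSentencesOnly(dados):
--     # Recursive back-to-front construction: build the result for the tail
--     # first, then prepend this sentence's first column (extracted by index),
--     # skipping empty sentences (A skips them via the IndexError from zip).
--     if not dados:
--         return []
--     rest = getSentencesOnly(dados[1:])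
--     sent = dados[0]
--     if not sent:
--         return rest
--     col = []
--     for i in range(len(sent)):
--         col.append(sent[i][0])
--     return [col] + rest
-- ===== Notes on version B (the rewrite author's own statement) =====
-- stated objective: alternative
-- what changed: Replaces A's forward accumulator loop with try/except zip-transpose by structural recursion that builds the output back-to-front, extracting each first column by index iteration instead of transposing.
import Mathlib
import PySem

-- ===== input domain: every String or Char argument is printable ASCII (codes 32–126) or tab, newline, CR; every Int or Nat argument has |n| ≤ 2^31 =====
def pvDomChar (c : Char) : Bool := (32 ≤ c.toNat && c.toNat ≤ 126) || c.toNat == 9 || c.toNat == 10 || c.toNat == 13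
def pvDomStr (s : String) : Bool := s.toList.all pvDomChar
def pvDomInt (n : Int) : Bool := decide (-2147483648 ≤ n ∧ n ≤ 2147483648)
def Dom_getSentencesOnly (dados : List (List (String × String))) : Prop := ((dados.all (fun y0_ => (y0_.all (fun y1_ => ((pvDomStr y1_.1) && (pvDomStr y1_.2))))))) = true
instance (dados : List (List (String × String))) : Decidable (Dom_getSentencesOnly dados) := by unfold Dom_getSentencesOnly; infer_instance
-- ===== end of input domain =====

-- B replaces A's try/except zip-transpose accumulator loop by back-to-front structural recursion with indexed column extraction (alternative decomposition, same cost).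


-- ===== PORT A =====
-- loop over dados with accumulator newDados; zip(*sent)[0] raises IndexError
-- exactly when sent is empty (then 'except: pass' skips the append),
-- otherwise it is the list of first components.
def getSentencesOnly (dados : List (List (String × String))) : List (List String) :=
  dados.foldl
    (fun newDados sent =>
      if sent.isEmpty then newDados
      else newDados ++ [sent.map Prod.fst])
    []

-- ===== PORT B =====
-- 'for i in range(len(sent)): col.append(sent[i][0])'
def pvFirstCol (sent : List (String × String)) : List String :=
  (List.range sent.length).foldl (fun col i => col ++ [(sent.getD i ("", "")).1]) []

-- structural recursion building the result back-to-front, as in Source B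
def getSentencesOnly_alt (dados : List (List (String × String))) : List (List String) :=
  match dados with
  | [] => []
  | sent :: tl =>
    let rest := getSentencesOnly_alt tl
    if sent.isEmpty then rest else pvFirstCol sent :: rest

-- ===== PRECONDITION & SPEC =====
def Spec_getSentencesOnly (dados : List (List (String × String))) (out : List (List String)) : Prop := out = getSentencesOnly_alt dados
instance (dados : List (List (String × String))) (out : List (List String)) : Decidable (Spec_getSentencesOnly dados out) := by unfold Spec_getSentencesOnly; infer_instance

-- ===== CLAIM (what is proved, stated in full; the proofs are below) =====
def Claim_equal_getSentencesOnly : Prop := ∀ (dados : List (List (String × String))), Dom_getSentencesOnly dados → Spec_getSentencesOnly dados (getSentencesOnly dados)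

-- ===== LEMMAS AND PROOFS =====

theorem foldl_range_append {α : Type} (f : Nat → α) (n : Nat) (acc : List α) :
    (List.range n).foldl (fun col i => col ++ [f i]) acc = acc ++ (List.range n).map f := by
  induction n generalizing acc with
  | zero => simp
  | succ m ih => simp [List.range_succ, ih]

theorem range_map_getD (l : List (String × String)) :
    (List.range l.length).map (fun i => (l.getD i ("", "")).1) = l.map Prod.fst := by
  induction l with
  | nil => simp
  | cons a t ih =>
    simp only [List.length_cons, List.range_succ_eq_map, List.map_cons, List.map_map,
      Function.comp_def, List.getD_cons_succ, List.getD_cons_zero]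
    rw [ih]

theorem pvFirstCol_eq (sent : List (String × String)) :
    pvFirstCol sent = sent.map Prod.fst := by
  unfold pvFirstCol
  rw [foldl_range_append (fun i => (sent.getD i ("", "")).1) sent.length []]
  exact range_map_getD sent

theorem getSentencesOnly_foldl (dados : List (List (String × String))) (acc : List (List String)) :
    dados.foldl
      (fun newDados sent =>
        if sent.isEmpty then newDados
        else newDados ++ [sent.map Prod.fst]) acc
    = acc ++ getSentencesOnly_alt dados := by
  induction dados generalizing acc with
  | nil => simp [getSentencesOnly_alt]
  | cons s t ih =>
    simp only [List.foldl_cons, getSentencesOnly_alt]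
    by_cases h : s.isEmpty
    · rw [if_pos h, if_pos h, ih]
    · rw [if_neg h, if_neg h, ih]
      simp [pvFirstCol_eq]

-- ===== VERDICT (by name: the statement is the Claim_ definition above) =====
theorem getSentencesOnly_spec : Claim_equal_getSentencesOnly := by
  intro dados _
  show getSentencesOnly dados = getSentencesOnly_alt dados
  unfold getSentencesOnly
  simpa using getSentencesOnly_foldl dados []
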